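-- pv_equiv track=rewrite | github.com/hrebeniukv/HomeWork | HomeWork5/HW5.py | words_checking
-- ===== SOURCE A (Python) =====
-- def words_checking(cheking_string: list, letters: list) -> int:
--     letter_counter = 0
--     for world in cheking_string:
--
--         neighbor_counter = 0
--         for i in range(len(world)):
--             if world[i] in letters:
--                 neighbor_counter += 1
--             else:
--                 neighbor_counter = 0
--
--             if neighbor_counter == 2:
--                 letter_counter += 1
--                 break
--     return letter_counter
-- ===== SOURCE B (Python) =====
-- def words_checking(cheking_string: list, letters: list) -> int:
--     ls = set(letters)
--     # Stage 1: map every word to a binary mask string ('1' = char allowed).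
--     masks = [''.join('1' if c in ls else '0' for c in word) for word in cheking_string]
--     # Stage 2: a word qualifies iff its mask contains the substring '11'.
--     return sum('11' in m for m in masks)
-- ===== Notes on version B (the rewrite author's own statement) =====
-- stated objective: alternative
-- what changed: Replaces A's per-character run-counter automaton with break by a staged pipeline: each word is first mapped to a 0/1 membership mask string, then counted iff the substring '11' occurs in its mask; the state machine, counter reset and early exit disappear, and letters becomes a set so each membership test is O(1) instead of a list scan.
import Mathlib
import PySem

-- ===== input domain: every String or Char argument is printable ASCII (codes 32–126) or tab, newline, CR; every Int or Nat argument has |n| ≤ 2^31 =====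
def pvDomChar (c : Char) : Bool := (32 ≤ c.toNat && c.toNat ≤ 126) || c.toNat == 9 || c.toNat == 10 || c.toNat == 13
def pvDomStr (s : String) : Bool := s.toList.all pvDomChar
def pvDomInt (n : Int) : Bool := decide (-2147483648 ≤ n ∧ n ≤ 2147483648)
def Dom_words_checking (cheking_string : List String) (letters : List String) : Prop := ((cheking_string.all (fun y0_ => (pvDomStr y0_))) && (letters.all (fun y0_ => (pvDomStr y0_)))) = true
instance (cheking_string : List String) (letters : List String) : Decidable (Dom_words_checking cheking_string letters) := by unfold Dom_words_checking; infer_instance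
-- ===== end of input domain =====

-- B replaces A's run-counter automaton (increment/reset/break) by a staged
-- pipeline: each word is mapped to a 0/1 membership mask and counted iff the
-- mask contains the substring "11"; objective: alternative.

-- ===== PORT A =====
-- A's inner loop: running counter, +1 on membership, reset to 0 otherwise,
-- break (return true) when the counter reaches 2.
def wcInnerA (letters : List String) : List Char → Int → Bool
  | [], _ => false
  | c :: rest, k =>
    let k' := if letters.contains (String.mk [c]) then k + 1 else 0
    if k' == 2 then true else wcInnerA letters rest k'

def words_checking (cheking_string : List String) (letters : List String) : Int :=
  cheking_string.foldl
    (fun letter_counter world =>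
      if wcInnerA letters world.toList 0 then letter_counter + 1 else letter_counter)
    0

-- ===== PORT B =====
-- ''.join('1' if c in ls else '0' for c in word)
def wcMask (ls : PySem.Set String) (word : String) : List Char :=
  word.toList.map (fun c => if PySem.Set.contains ls (String.mk [c]) then '1' else '0')

def words_checking_alt (cheking_string : List String) (letters : List String) : Int :=
  let ls := PySem.Set.ofList letters
  let masks := cheking_string.map (fun word => wcMask ls word)
  -- sum('11' in m for m in masks): booleans count as 0/1
  masks.foldl (fun acc m => acc + (if PySem.Chars.isIn ['1', '1'] m then 1 else 0)) 0

-- ===== PRECONDITION & SPEC =====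
def Spec_words_checking (cheking_string : List String) (letters : List String) (out : Int) : Prop := out = words_checking_alt cheking_string letters
instance (cheking_string : List String) (letters : List String) (out : Int) : Decidable (Spec_words_checking cheking_string letters out) := by unfold Spec_words_checking; infer_instance

-- ===== CLAIM (what is proved, stated in full; the proofs are below) =====
def Claim_equal_words_checking : Prop := ∀ (cheking_string : List String) (letters : List String), Dom_words_checking cheking_string letters → Spec_words_checking cheking_string letters (words_checking cheking_string letters)

-- ===== LEMMAS AND PROOFS =====

-- The membership bit used by the mask.
def wcBit (letters : List String) (c : Char) : Char :=
  if letters.contains (String.mk [c]) then '1' else '0'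

-- Adjacent-pair characterisation, the common meeting point of both programs.
def wcPairAny (letters : List String) : List Char → Bool
  | [] => false
  | [_] => false
  | a :: b :: r =>
    (letters.contains (String.mk [a]) && letters.contains (String.mk [b]))
      || wcPairAny letters (b :: r)

theorem wcMask_eq (letters : List String) (word : String) :
    wcMask (PySem.Set.ofList letters) word = word.toList.map (wcBit letters) := by
  simp [wcMask, wcBit, PySem.Set.mem_ofList]

theorem wcBit_eq_one (letters : List String) (c : Char) :
    wcBit letters c = '1' ↔ letters.contains (String.mk [c]) = true := by
  unfold wcBit; split_ifs with h <;> simp_all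

-- "11" occurs in the mask iff some adjacent pair is jointly allowed.
theorem infix_mask_iff (letters : List String) :
    ∀ cs : List Char,
      (['1', '1'] <:+: cs.map (wcBit letters)) ↔ wcPairAny letters cs = true := by
  intro cs
  induction cs with
  | nil => simp [wcPairAny]
  | cons a rest ih =>
    cases rest with
    | nil =>
      simp only [List.map, wcPairAny]
      constructor
      · intro h
        have := h.sublist.length_le
        simp at this
      · simp
    | cons b r =>
      simp only [List.map]
      rw [List.infix_cons_iff]
      constructor
      · rintro (hp | hi)
        · rw [List.cons_prefix_cons] at hp
          obtain ⟨h1, hp⟩ := hp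
          rw [List.cons_prefix_cons] at hp
          obtain ⟨h2, _⟩ := hp
          have ha := (wcBit_eq_one letters a).1 h1.symm
          have hb := (wcBit_eq_one letters b).1 h2.symm
          simp only [wcPairAny, Bool.or_eq_true, Bool.and_eq_true]
          exact Or.inl ⟨ha, hb⟩
        · have := ih.1 hi
          simp [wcPairAny, this]
      · intro h
        simp only [wcPairAny, Bool.or_eq_true, Bool.and_eq_true] at h
        rcases h with ⟨ha, hb⟩ | h
        · left
          rw [List.cons_prefix_cons]
          refine ⟨((wcBit_eq_one letters a).2 ha).symm, ?_⟩
          rw [List.cons_prefix_cons]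
          exact ⟨((wcBit_eq_one letters b).2 hb).symm, List.nil_prefix⟩
        · right
          exact ih.2 h

-- A's automaton at states 0 and 1 versus the pair characterisation.
theorem wcInnerA_cons (letters : List String) (c : Char) (rest : List Char) (k : Int) :
    wcInnerA letters (c :: rest) k =
      (let k' := if letters.contains (String.mk [c]) then k + 1 else 0;
       if k' == 2 then true else wcInnerA letters rest k') := rfl

theorem wcInnerA_eq (letters : List String) :
    ∀ cs : List Char,
      wcInnerA letters cs 0 = wcPairAny letters cs ∧
      wcInnerA letters cs 1 =
        ((match cs with
          | [] => false
          | c :: _ => letters.contains (String.mk [c])) || wcPairAny letters cs) := by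
  intro cs
  induction cs with
  | nil => simp [wcInnerA, wcPairAny]
  | cons c rest ih =>
    obtain ⟨ih0, ih1⟩ := ih
    rw [wcInnerA_cons, wcInnerA_cons]
    by_cases hm : String.mk [c] ∈ letters
    · simp only [List.contains_eq_mem, hm, decide_true, if_true]
      norm_num
      rw [ih1]
      cases rest with
      | nil => simp [wcPairAny]
      | cons b r => simp [wcPairAny, hm]
    · simp only [List.contains_eq_mem, hm, decide_false]
      norm_num
      rw [ih0]
      cases rest with
      | nil => simp [wcPairAny]
      | cons b r => simp [wcPairAny, hm]

-- Per-word predicates of the two programs coincide.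
theorem wc_word_eq (letters : List String) (word : String) :
    wcInnerA letters word.toList 0
      = PySem.Chars.isIn ['1', '1'] (wcMask (PySem.Set.ofList letters) word) := by
  rw [(wcInnerA_eq letters word.toList).1, wcMask_eq]
  by_cases h : wcPairAny letters word.toList = true
  · rw [h, eq_comm, PySem.Chars.isIn_iff_infix, infix_mask_iff]
    exact h
  · rw [Bool.not_eq_true] at h
    rw [h, eq_comm, PySem.Chars.isIn_eq_false_iff, infix_mask_iff]
    simp [h]

-- ===== VERDICT (by name: the statement is the Claim_ definition above) =====
theorem words_checking_spec : Claim_equal_words_checking := by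
  intro cs letters _
  unfold Spec_words_checking words_checking words_checking_alt
  rw [List.foldl_map]
  apply PySem.List.foldl_congr_mem
  intro acc w _
  rw [wc_word_eq letters w]
  split <;> ring
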